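-- pv_equiv track=rewrite | github.com/lucasrodri/apc.t05.2022.2 | Aula06/ex1.py | criaBolo
-- ===== SOURCE A (Python) =====
-- def criaBolo(nfatias, premiada):
--     lista = []
--     for i in range(nfatias):
--         if i == premiada:
--             lista.append(True)
--         else:
--             lista.append(False)
--     return lista
-- ===== SOURCE B (Python) =====
-- def criaBolo(nfatias, premiada):
--     lista = [False] * max(nfatias, 0)
--     if 0 <= premiada < nfatias:
--         lista[premiada] = True
--     return lista
-- ===== Notes on version B (the rewrite author's own statement) =====
-- stated objective: simpler
-- what changed: Replaces the per-element compare-and-branch loop by a bulk all-False fill followed by one guarded targeted write at the prize index.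
import Mathlib
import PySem

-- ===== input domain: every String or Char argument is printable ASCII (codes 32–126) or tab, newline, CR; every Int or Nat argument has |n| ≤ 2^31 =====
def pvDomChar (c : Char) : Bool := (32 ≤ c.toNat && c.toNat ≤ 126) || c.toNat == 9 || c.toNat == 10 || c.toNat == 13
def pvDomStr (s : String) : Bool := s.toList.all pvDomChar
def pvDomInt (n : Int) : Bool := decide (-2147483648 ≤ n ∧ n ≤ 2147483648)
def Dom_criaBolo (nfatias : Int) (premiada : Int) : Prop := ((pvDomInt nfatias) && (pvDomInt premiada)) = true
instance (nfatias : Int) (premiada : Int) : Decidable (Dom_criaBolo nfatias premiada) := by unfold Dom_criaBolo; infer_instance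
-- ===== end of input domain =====

-- ===== PORT A =====
-- B replaces the per-element branch loop with a bulk all-False fill plus one guarded targeted write (same O(n), simpler structure).
def criaBolo (nfatias : Int) (premiada : Int) : List Bool :=
  (PySem.List.pyRange 0 nfatias 1).foldl
    (fun lista i => if i == premiada then lista ++ [true] else lista ++ [false]) []

-- ===== PORT B =====
def criaBolo_alt (nfatias : Int) (premiada : Int) : List Bool :=
  if 0 ≤ premiada ∧ premiada < nfatias then
    (List.replicate (max nfatias 0).toNat false).set premiada.toNat true
  else List.replicate (max nfatias 0).toNat false

-- ===== PRECONDITION & SPEC =====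
def Spec_criaBolo (nfatias : Int) (premiada : Int) (out : List Bool) : Prop := out = criaBolo_alt nfatias premiada
instance (nfatias : Int) (premiada : Int) (out : List Bool) : Decidable (Spec_criaBolo nfatias premiada out) := by unfold Spec_criaBolo; infer_instance

-- ===== CLAIM (what is proved, stated in full; the proofs are below) =====
def Claim_equal_criaBolo : Prop := ∀ (nfatias : Int) (premiada : Int), Dom_criaBolo nfatias premiada → Spec_criaBolo nfatias premiada (criaBolo nfatias premiada)

-- ===== LEMMAS AND PROOFS =====

-- ===== VERDICT (by name: the statement is the Claim_ definition above) =====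
theorem criaBolo_spec : Claim_equal_criaBolo := by
  intro nfatias premiada _
  unfold Spec_criaBolo criaBolo criaBolo_alt
  rw [show (fun (lista : List Bool) (i : Int) =>
      if i == premiada then lista ++ [true] else lista ++ [false])
      = fun lista i => lista ++ [(i == premiada)] from by
    funext lista i; by_cases h : i == premiada <;> simp [h],
    PySem.List.foldl_append_singleton_eq_map _ _ _]
  apply List.ext_getElem
  · simp [PySem.List.length_pyRange_one]
    split_ifs <;> simp <;> omega
  · intro k h1 h2
    simp only [List.nil_append] at h1 ⊢
    simp only [List.length_map, PySem.List.length_pyRange_one] at h1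
    rw [List.getElem_map, PySem.List.getElem_pyRange_one]
    by_cases hp : 0 ≤ premiada ∧ premiada < nfatias
    · simp only [hp, and_self, if_true, List.getElem_set, List.getElem_replicate]
      split_ifs with he <;> simp <;> omega
    · simp only [hp, if_false, List.getElem_replicate]
      simp
      omega
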